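-- pv_equiv track=rewrite | github.com/Agusmoure/GIW | Practica1/pr1.py | dimension
-- ===== SOURCE A (Python) =====
-- def dimension(matriz):
--     """
--     Funcion que se encarga de obtener la dimension de una matriz
--     si la matriz no es valida devuelve "None"
--     en caso de que si sea valida devuelve sus dimensiones en forma de tupla
--
--     """
--
--     #Comprobamos matriz vacía
--     if len(matriz)<=0:
--         return None
--     #Guardamos valor de columnas
--     col=len(matriz[0])
--     for fila in matriz:
--         if len(fila)!=col :#Si hay columnas de distinto tamaño matriz mal formada
--             return None
--     #Si la matriz esta bien formada devolvemos la tupla correspondiente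
--     dim=(len(matriz),col)
--     return dim
-- ===== SOURCE B (Python) =====
-- def dimension(matriz):
--     if not matriz:
--         return None
--     row, rest = matriz[0], matriz[1:]
--     if not rest:
--         return (1, len(row))
--     sub = dimension(rest)
--     if sub is None or sub[1] != len(row):
--         return None
--     return (sub[0] + 1, sub[1])
-- ===== Notes on version B (the rewrite author's own statement) =====
-- stated objective: alternative
-- what changed: B computes the dimension by structural recursion: the dimension of the tail submatrix is computed first and the head row's length must agree with the tail's column count, instead of A's iterative scan comparing every row to the first row's fixed length with an early exit.
import Mathlib
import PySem

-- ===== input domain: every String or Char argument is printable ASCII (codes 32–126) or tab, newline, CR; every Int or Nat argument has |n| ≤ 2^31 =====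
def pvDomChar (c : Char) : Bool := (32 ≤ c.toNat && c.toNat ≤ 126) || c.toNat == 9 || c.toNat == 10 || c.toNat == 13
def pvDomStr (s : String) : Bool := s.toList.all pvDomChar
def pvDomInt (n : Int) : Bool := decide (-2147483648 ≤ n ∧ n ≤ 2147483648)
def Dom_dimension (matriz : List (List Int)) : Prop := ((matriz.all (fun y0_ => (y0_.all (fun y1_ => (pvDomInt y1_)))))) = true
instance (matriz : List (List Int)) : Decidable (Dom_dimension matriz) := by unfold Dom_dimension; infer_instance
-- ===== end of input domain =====

-- B replaces A's fixed-reference early-exit scan by structural recursion on the row list (alternative; same cost).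


-- ===== PORT A =====
-- the early-exit 'for fila in matriz' loop: true ⇔ the loop runs to the end without returning None
def dimLoopA (col : Int) : List (List Int) → Bool
  | [] => true
  | fila :: rest => if (fila.length : Int) ≠ col then false else dimLoopA col rest

def dimension (matriz : List (List Int)) : Option (Int × Int) :=
  if (matriz.length : Int) ≤ 0 then none
  else
    -- col = len(matriz[0]); the index is in range here since the list is nonempty
    let col : Int := ((matriz.headD []).length : Int)
    if dimLoopA col matriz then some ((matriz.length : Int), col) else none

-- ===== PORT B =====
def dimension_alt : List (List Int) → Option (Int × Int)
  | [] => none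
  | row :: rest =>
    match rest with
    | [] => some (1, (row.length : Int))
    | _ :: _ =>
      match dimension_alt rest with
      | none => none
      | some sub => if sub.2 ≠ (row.length : Int) then none else some (sub.1 + 1, sub.2)

-- ===== PRECONDITION & SPEC =====
def Spec_dimension (matriz : List (List Int)) (out : Option (Int × Int)) : Prop := out = dimension_alt matriz
instance (matriz : List (List Int)) (out : Option (Int × Int)) : Decidable (Spec_dimension matriz out) := by unfold Spec_dimension; infer_instance

-- ===== CLAIM (what is proved, stated in full; the proofs are below) =====
def Claim_equal_dimension : Prop := ∀ (matriz : List (List Int)), Dom_dimension matriz → Spec_dimension matriz (dimension matriz)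

-- ===== LEMMAS AND PROOFS =====
theorem alt_char (rest : List (List Int)) : ∀ f : List Int,
    dimension_alt (f :: rest)
      = if dimLoopA (f.length : Int) (f :: rest) = true
        then some (((f :: rest).length : Int), (f.length : Int)) else none := by
  induction rest with
  | nil => intro f; simp [dimension_alt, dimLoopA]
  | cons g t ih =>
    intro f
    have hstep : dimension_alt (f :: g :: t)
        = match dimension_alt (g :: t) with
          | none => none
          | some sub => if sub.2 ≠ (f.length : Int) then none else some (sub.1 + 1, sub.2) := rfl
    rw [hstep, ih g]
    by_cases hg : dimLoopA ((g.length : Int)) (g :: t) = true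
    · rw [if_pos hg]
      by_cases hfg : (g.length : Int) = (f.length : Int)
      · have hloop : dimLoopA ((f.length : Int)) (f :: g :: t) = true := by
          simp only [dimLoopA, if_neg (by simp : ¬ ((f.length : Int) ≠ (f.length : Int)))]
          rw [← hfg]; exact hg
        simp [hfg, hloop]
      · have hloop : dimLoopA ((f.length : Int)) (f :: g :: t) = false := by
          simp only [dimLoopA, if_neg (by simp : ¬ ((f.length : Int) ≠ (f.length : Int)))]
          rw [if_pos (by exact fun h => hfg h)]
        simp [hfg, hloop]
    · rw [if_neg hg]
      have hgt : dimLoopA ((g.length : Int)) t = false := by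
        by_contra h
        apply hg
        simp only [dimLoopA, if_neg (by simp : ¬ ((g.length : Int) ≠ (g.length : Int)))]
        simpa using h
      have hloop : dimLoopA ((f.length : Int)) (f :: g :: t) = false := by
        simp only [dimLoopA, if_neg (by simp : ¬ ((f.length : Int) ≠ (f.length : Int)))]
        by_cases hfg : (g.length : Int) = (f.length : Int)
        · rw [if_neg (by simp [hfg])]
          rw [← hfg]; exact hgt
        · rw [if_pos (by exact fun h => hfg h)]
      simp [hloop]

-- ===== VERDICT (by name: the statement is the Claim_ definition above) =====
theorem dimension_spec : Claim_equal_dimension := by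
  intro matriz _
  unfold Spec_dimension
  cases matriz with
  | nil => rfl
  | cons f rest =>
    rw [alt_char rest f]
    simp [dimension]
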